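-- pv_equiv track=rewrite | github.com/tomdom35/Daily-Programmer-Challenges | Challenge 223 - Hard - July 21, 2015 - Heighway Dragon Fractal - Python/Challenge 223 - Hard - July 21, 2015 - Heighway Dragon Fractal - Python.py | findFractal
-- ===== SOURCE A (Python) =====
-- def findFractal(n):
--     directions = []
--     for i in range(0,n+1):
--         if i == 0:
--             directions.append(4)
--         else:
--             newDirections = shiftRight(directions)
--             newDirections = list(reversed(newDirections))
--             directions += newDirections
--     return directions
--
-- def shiftRight(directions):
--     newDirections = []
--     for i in range(0,len(directions)):
--         if(directions[i]==4):
--             newDirections.append(1)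
--         else:
--             newDirections.append(directions[i] + 1)
--     return newDirections
-- ===== SOURCE B (Python) =====
-- def findFractal(n):
--     # Direct index-driven generation: entry k is the absolute heading (1..4, with
--     # 4 standing for heading 0) after k turns of the dragon curve; the k-th turn
--     # is read off the odd part of k (right iff odd part is 3 mod 4).
--     if n < 0:
--         return []
--     result = [4]
--     d = 0
--     for k in range(1, 2 ** n):
--         m = k
--         while m % 2 == 0:
--             m //= 2
--         d = (d - 1) % 4 if m % 4 == 3 else (d + 1) % 4
--         result.append(d if d != 0 else 4)
--     return result
-- ===== Notes on version B (the rewrite author's own statement) =====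
-- stated objective: alternative
-- what changed: Replaces the repeated shift-and-reversed-copy doubling of the whole list by a single left-to-right pass that computes each entry independently from its index: the k-th turn direction is read off the odd part of k (right iff odd part is 3 mod 4) and a running heading mod 4 is emitted (4 for heading 0).
import Mathlib
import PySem

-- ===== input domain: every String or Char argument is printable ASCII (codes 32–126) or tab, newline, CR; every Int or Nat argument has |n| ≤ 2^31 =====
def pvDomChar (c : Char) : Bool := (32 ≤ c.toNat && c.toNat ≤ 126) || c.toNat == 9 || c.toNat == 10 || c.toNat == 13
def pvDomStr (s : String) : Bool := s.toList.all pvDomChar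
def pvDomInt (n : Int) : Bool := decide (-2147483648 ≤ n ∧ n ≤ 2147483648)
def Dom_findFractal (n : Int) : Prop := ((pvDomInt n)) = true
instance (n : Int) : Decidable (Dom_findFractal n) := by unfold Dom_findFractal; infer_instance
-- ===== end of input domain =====

-- B replaces A's shift-and-reversed-copy doubling by one pass computing each entry
-- from its index (turn read off the odd part of k); alternative algorithm, no speed claim.

-- ===== PORT A =====
def shiftRightA (directions : List Int) : List Int :=
  directions.foldl (fun newDirections d => newDirections ++ [if d = 4 then 1 else d + 1]) []

def findFractal (n : Int) : List Int :=
  (PySem.List.pyRange 0 (n + 1) 1).foldl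
    (fun directions i =>
      if i = 0 then directions ++ [4]
      else directions ++ (shiftRightA directions).reverse) []

-- ===== PORT B =====
-- the `while m % 2 == 0: m //= 2` loop of Source B (k ≥ 1 there, so the Nat form is exact)
def oddPartB : Nat → Nat
  | 0 => 0
  | m + 1 => if (m + 1) % 2 = 0 then oddPartB ((m + 1) / 2) else m + 1
decreasing_by omega

def findFractal_alt (n : Int) : List Int :=
  if n < 0 then []
  else
    ((List.range' 1 (2 ^ n.toNat - 1)).foldl
      (fun (st : List Int × Int) k =>
        let m := oddPartB k
        let d := if (m : Int) % 4 = 3 then (st.2 - 1) % 4 else (st.2 + 1) % 4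
        (st.1 ++ [if d ≠ 0 then d else 4], d)) ([4], 0)).1

-- ===== PRECONDITION & SPEC =====
def Spec_findFractal (n : Int) (out : List Int) : Prop := out = findFractal_alt n
instance (n : Int) (out : List Int) : Decidable (Spec_findFractal n out) := by unfold Spec_findFractal; infer_instance

-- ===== CLAIM (what is proved, stated in full; the proofs are below) =====
def Claim_equal_findFractal : Prop := ∀ (n : Int), Dom_findFractal n → Spec_findFractal n (findFractal n)

-- ===== LEMMAS AND PROOFS =====

/-- A's per-round transformation: append the reversed, shifted copy. -/
def succ4 (x : Int) : Int := if x = 4 then 1 else x + 1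

def stepA (L : List Int) : List Int := L ++ (L.map succ4).reverse

/-- A's list after m doubling rounds. -/
def iterA : Nat → List Int
  | 0 => [4]
  | m + 1 => stepA (iterA m)

/-- B's running heading mod 4 after k turns. -/
def hd : Nat → Int
  | 0 => 0
  | k + 1 => if oddPartB (k + 1) % 4 = 3 then (hd k - 1) % 4 else (hd k + 1) % 4

/-- B's encoding of a heading as a direction 1..4. -/
def enc (d : Int) : Int := if d ≠ 0 then d else 4

theorem shiftRightA_eq (L : List Int) : shiftRightA L = L.map succ4 := by
  rw [shiftRightA,
    PySem.List.foldl_append_singleton_eq_map (fun d : Int => if d = 4 then 1 else d + 1) L [],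
    List.nil_append]
  rfl

theorem hd_bounds (k : Nat) : 0 ≤ hd k ∧ hd k < 4 := by
  cases k with
  | zero => simp [hd]
  | succ k => simp only [hd]; split <;> omega

theorem oddPartB_odd {k : Nat} (h : k % 2 = 1) : oddPartB k = k := by
  cases k with
  | zero => simp at h
  | succ m => rw [oddPartB]; simp [h]

theorem oddPartB_two_mul (a : Nat) : oddPartB (2 * a) = oddPartB a := by
  cases a with
  | zero => rfl
  | succ m =>
    rw [show 2 * (m + 1) = (2 * m + 1) + 1 from rfl, oddPartB]
    rw [if_pos (by omega), show (2 * m + 1 + 1) / 2 = m + 1 by omega]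

theorem oddPartB_pow (m : Nat) : oddPartB (2 ^ m) = 1 := by
  induction m with
  | zero => rw [pow_zero]; exact oddPartB_odd (by omega)
  | succ m ih => rw [pow_succ, mul_comm, oddPartB_two_mul]; exact ih

/-- Turn symmetry of the paperfolding sequence: for 1 ≤ k < 2^m the turn at
    2^(m+1) − k is the opposite of the turn at k. -/
theorem turn_symm : ∀ m k : Nat, 1 ≤ k → k < 2 ^ m →
    (oddPartB (2 ^ (m + 1) - k) % 4 = 3 ↔ ¬ oddPartB k % 4 = 3) := by
  intro m
  induction m with
  | zero => intro k h1 h2; omega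
  | succ m ih =>
    intro k h1 h2
    rcases Nat.even_or_odd k with ⟨a, ha⟩ | hodd
    · -- even: halve both sides and use the induction hypothesis
      have ha2 : k = 2 * a := by omega
      have ha1 : 1 ≤ a := by omega
      have halt : a < 2 ^ m := by
        have hps : 2 ^ (m + 1) = 2 ^ m * 2 := pow_succ 2 m
        omega
      have hsub : 2 ^ (m + 1 + 1) - k = 2 * (2 ^ (m + 1) - a) := by
        have : 2 ^ (m + 1 + 1) = 2 * 2 ^ (m + 1) := by ring
        omega
      rw [hsub, ha2, oddPartB_two_mul, oddPartB_two_mul]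
      exact ih a ha1 halt
    · -- odd: both odd parts are the numbers themselves; compare mod 4
      have hk2 : k % 2 = 1 := Nat.odd_iff.mp hodd
      have hN : 2 ^ (m + 1 + 1) % 4 = 0 := by
        have : (4 : Nat) ∣ 2 ^ (m + 1 + 1) := by
          have : (2 : Nat) ^ 2 ∣ 2 ^ (m + 1 + 1) := pow_dvd_pow 2 (by omega)
          simpa using this
        omega
      have hkN : k < 2 ^ (m + 1 + 1) := by
        have : (2 : Nat) ^ (m + 1) ≤ 2 ^ (m + 1 + 1) := Nat.pow_le_pow_right (by omega) (by omega)
        omega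
      have hsub2 : (2 ^ (m + 1 + 1) - k) % 2 = 1 := by omega
      rw [oddPartB_odd hk2, oddPartB_odd hsub2]
      omega

theorem succ4_enc {x : Int} (h0 : 0 ≤ x) (h4 : x < 4) :
    succ4 (enc x) = enc ((x + 1) % 4) := by
  interval_cases x <;> decide

/-- Heading symmetry inside a doubling block. -/
theorem hd_block (m : Nat) : ∀ i : Nat, i < 2 ^ m →
    hd (2 ^ m + i) = (hd (2 ^ m - 1 - i) + 1) % 4 := by
  have hp : 1 ≤ 2 ^ m := Nat.one_le_two_pow
  intro i
  induction i with
  | zero =>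
    intro _
    obtain ⟨p, hp'⟩ : ∃ p, 2 ^ m = p + 1 := ⟨2 ^ m - 1, by omega⟩
    rw [show 2 ^ m + 0 = 2 ^ m from rfl, hp', hd, ← hp', oddPartB_pow]
    simp [hp']
  | succ i ihi =>
    intro hlt
    have hi : i < 2 ^ m := by omega
    have ih := ihi hi
    -- j = 2^m - 1 - i is the mirror index, 1 ≤ j < 2^m
    obtain ⟨j1, hj1⟩ : ∃ j1, 2 ^ m - 1 - i = j1 + 1 := ⟨2 ^ m - 2 - i, by omega⟩
    have hsymm := turn_symm m (2 ^ m - 1 - i) (by omega) (by omega)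
    have hmirror : 2 ^ (m + 1) - (2 ^ m - 1 - i) = 2 ^ m + i + 1 := by
      have : 2 ^ (m + 1) = 2 ^ m + 2 ^ m := by ring
      omega
    rw [hmirror] at hsymm
    have hj2 : 2 ^ m - 1 - (i + 1) = j1 := by omega
    have hb := hd_bounds j1
    rw [show 2 ^ m + (i + 1) = (2 ^ m + i) + 1 from rfl, hd, ih, hj1, hd, hj2]
    rw [hj1] at hsymm
    by_cases ht : oddPartB (j1 + 1) % 4 = 3
    · rw [if_pos ht, if_neg (by tauto)]
      omega
    · rw [if_neg ht, if_pos (by tauto)]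
      omega

/-- A's doubling rounds produce exactly the index-driven sequence. -/
theorem iterA_eq (m : Nat) :
    iterA m = (List.range (2 ^ m)).map (fun k => enc (hd k)) := by
  induction m with
  | zero => decide
  | succ m ih =>
    have hsplit : (2 : Nat) ^ (m + 1) = 2 ^ m + 2 ^ m := by ring
    rw [iterA, stepA, ih, hsplit, List.range_add, List.map_append]
    congr 1
    rw [List.map_map, List.map_map]
    apply List.ext_getElem
    · simp
    · intro i h1 h2
      simp only [List.getElem_reverse, List.getElem_map, List.getElem_range,
        List.length_map, List.length_range] at *
      have hlt : i < 2 ^ m := by simpa using h2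
      have hb := hd_bounds (2 ^ m - 1 - i)
      calc succ4 (enc (hd (2 ^ m - 1 - i)))
          = enc ((hd (2 ^ m - 1 - i) + 1) % 4) := succ4_enc hb.1 hb.2
        _ = enc (hd (2 ^ m + i)) := by rw [hd_block m i hlt]

/-- Invariant of B's fold: the list built so far and the current heading. -/
theorem fold_alt (N : Nat) :
    (List.range' 1 N).foldl
      (fun (st : List Int × Int) k =>
        let m := oddPartB k
        let d := if (m : Int) % 4 = 3 then (st.2 - 1) % 4 else (st.2 + 1) % 4
        (st.1 ++ [if d ≠ 0 then d else 4], d)) ([4], 0)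
    = ([4] ++ (List.range' 1 N).map (fun k => enc (hd k)), hd N) := by
  induction N with
  | zero => simp [hd]
  | succ N ih =>
    rw [List.range'_concat, List.foldl_append, ih, List.map_append, List.foldl_cons,
      List.foldl_nil]
    have h1 : 1 + 1 * N = N + 1 := by omega
    simp only [h1]
    have hh : (if ((oddPartB (N + 1) : Int)) % 4 = 3 then (hd N - 1) % 4 else (hd N + 1) % 4)
        = hd (N + 1) := by rw [hd]; exact if_congr (by omega) rfl rfl
    simp only [hh]
    simp [enc]

theorem findFractal_eq_iterA (m : Nat) : findFractal (m : Int) = iterA m := by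
  induction m with
  | zero =>
    rw [findFractal]
    norm_num [show ((0:Nat) : Int) + 1 = 0 + 1 from by norm_num, PySem.List.pyRange_one_singleton]
    decide
  | succ m ih =>
    rw [findFractal] at ih ⊢
    rw [show ((m + 1 : Nat) : Int) + 1 = ((m : Int) + 1) + 1 by push_cast; ring,
      PySem.List.pyRange_one_succ_right (by omega : (0:Int) ≤ (m : Int) + 1), List.foldl_append,
      ih, List.foldl_cons, List.foldl_nil, if_neg (by omega : ¬ ((m : Int) + 1 = 0))]
    rw [iterA, stepA, shiftRightA_eq]

-- ===== VERDICT (by name: the statement is the Claim_ definition above) =====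
theorem findFractal_spec : Claim_equal_findFractal := by
  intro n _
  unfold Spec_findFractal
  by_cases hneg : n < 0
  · rw [findFractal_alt, if_pos hneg, findFractal,
      PySem.List.pyRange_one_eq_nil (by omega)]
    rfl
  · have hn : n = (n.toNat : Int) := by omega
    have hA : findFractal n = iterA n.toNat := by
      conv_lhs => rw [hn]
      exact findFractal_eq_iterA n.toNat
    have h1 : 1 ≤ 2 ^ n.toNat := Nat.one_le_two_pow
    obtain ⟨p, hp⟩ : ∃ p, 2 ^ n.toNat = p + 1 := ⟨2 ^ n.toNat - 1, by omega⟩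
    rw [hA, iterA_eq, findFractal_alt, if_neg hneg, fold_alt, hp]
    simp only [Nat.add_sub_cancel, List.range_eq_range', List.range'_succ]
    simp [enc, hd]
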